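-- pv_equiv track=rewrite | github.com/vllm-project/vllm | vllm/distributed/kv_transfer/kv_connector/v1/hetero_tp_conv_utils.py | build_chunk_perm_inverse
-- ===== SOURCE A (Python) =====
-- import math
--
-- def build_chunk_perm_inverse(
--     conv_rows: int,
--     x_shard: int,
--     b_shard: int,
-- ) -> list[int]:
--     """Build gather indices: chunk-interleaved transposed -> original row-major.
--
--     Inverse of :func:`build_chunk_perm_forward`, applied on D-side after
--     RDMA read to restore the conv state to ``(conv_rows, [x|B|C])`` layout.
--
--     Args:
--         conv_rows: Conv state rows (d_conv - 1, e.g. 3).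
--         x_shard: Per-rank x sub-projection width (intermediate_size // tp).
--         b_shard: Per-rank B (or C) sub-projection width (n_groups * d_state // tp).
--
--     Returns:
--         Gather-index list of length ``conv_rows * (x_shard + 2 * b_shard)``.
--         ``inv[i] = j`` means restored position *i* reads from received
--         position *j*.
--     """
--     g = math.gcd(x_shard, b_shard)
--     x_r, b_r = x_shard // g, b_shard // g
--     shard_dim = x_shard + 2 * b_shard
--     inv_perm = [0] * (conv_rows * shard_dim)
--
--     in_pos = 0
--     for k in range(g):
--         for j in range(x_r):
--             out_col = k * x_r + j
--             for r in range(conv_rows):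
--                 inv_perm[r * shard_dim + out_col] = in_pos
--                 in_pos += 1
--         for j in range(b_r):
--             out_col = x_shard + k * b_r + j
--             for r in range(conv_rows):
--                 inv_perm[r * shard_dim + out_col] = in_pos
--                 in_pos += 1
--         for j in range(b_r):
--             out_col = x_shard + b_shard + k * b_r + j
--             for r in range(conv_rows):
--                 inv_perm[r * shard_dim + out_col] = in_pos
--                 in_pos += 1
--     return inv_perm
-- ===== SOURCE B (Python) =====
-- import math
--
-- def build_chunk_perm_inverse(
--     conv_rows: int,
--     x_shard: int,
--     b_shard: int,
-- ) -> list[int]: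
--     """Single flat pass over the RESTORED layout: for each output index compute
--     its source position in the received chunk-interleaved order by closed-form
--     div/mod arithmetic (no running counter, no permuted scatter order)."""
--     g = math.gcd(x_shard, b_shard)
--     x_r, b_r = x_shard // g, b_shard // g
--     chunk = x_r + 2 * b_r
--     shard_dim = x_shard + 2 * b_shard
--     inv = [0] * (conv_rows * shard_dim)
--     for i in range(conv_rows * shard_dim):
--         r, c = divmod(i, shard_dim)
--         if c < x_shard:
--             k, j = divmod(c, x_r)
--             pos = k * chunk + j
--         elif c < x_shard + b_shard:
--             k, j = divmod(c - x_shard, b_r)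
--             pos = k * chunk + x_r + j
--         else:
--             k, j = divmod(c - x_shard - b_shard, b_r)
--             pos = k * chunk + x_r + b_r + j
--         inv[i] = pos * conv_rows + r
--     return inv
-- ===== Notes on version B (the rewrite author's own statement) =====
-- stated objective: alternative
-- what changed: A walks the RECEIVED order (gcd-chunk, segment, sub-column, row) carrying a running in_pos counter and scatters it into the inverse; B makes one flat pass over the RESTORED layout and computes each entry's received position directly by closed-form div/mod arithmetic on the column index, with no counter and no chunk-order loops.
-- outside the precondition, e.g. on build_chunk_perm_inverse(1, -2, 3): A returns [2, 3, 4, 5], B returns [0, 1, 2, 3]; on build_chunk_perm_inverse(-1, -1, -1): A returns [0, 0, 0], B returns [-4, 5, -2]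
import Mathlib
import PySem

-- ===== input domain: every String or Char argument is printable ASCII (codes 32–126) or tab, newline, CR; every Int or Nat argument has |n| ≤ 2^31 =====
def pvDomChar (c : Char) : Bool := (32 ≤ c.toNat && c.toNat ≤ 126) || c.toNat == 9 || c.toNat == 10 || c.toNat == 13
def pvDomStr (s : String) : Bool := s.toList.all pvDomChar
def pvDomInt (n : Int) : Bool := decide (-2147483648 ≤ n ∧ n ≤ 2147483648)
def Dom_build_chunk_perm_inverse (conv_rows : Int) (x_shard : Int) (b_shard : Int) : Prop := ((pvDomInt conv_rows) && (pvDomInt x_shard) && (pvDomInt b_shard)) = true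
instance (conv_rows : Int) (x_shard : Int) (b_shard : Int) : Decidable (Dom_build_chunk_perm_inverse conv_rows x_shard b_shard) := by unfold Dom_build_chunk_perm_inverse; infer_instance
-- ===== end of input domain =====

-- B walks the restored layout row-major and computes each entry's received
-- position by closed-form div/mod arithmetic on the column index, instead of
-- A's received-order scatter driven by a running counter; same cost.

-- ===== PORT A =====
def build_chunk_perm_inverse (conv_rows : Int) (x_shard : Int) (b_shard : Int) : List Int :=
  let g : Int := Int.gcd x_shard b_shard
  let x_r := PySem.Int.floordiv x_shard g
  let b_r := PySem.Int.floordiv b_shard g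
  let shard_dim := x_shard + 2 * b_shard
  let inv_perm : List Int := List.replicate (conv_rows * shard_dim).toNat 0
  let st := (PySem.List.pyRange 0 g 1).foldl (fun st k =>
    let st := (PySem.List.pyRange 0 x_r 1).foldl (fun st j =>
      let out_col := k * x_r + j
      (PySem.List.pyRange 0 conv_rows 1).foldl
        (fun (st : List Int × Int) r =>
          (PySem.List.pySetD st.1 (r * shard_dim + out_col) st.2, st.2 + 1)) st) st
    let st := (PySem.List.pyRange 0 b_r 1).foldl (fun st j =>
      let out_col := x_shard + k * b_r + j
      (PySem.List.pyRange 0 conv_rows 1).foldl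
        (fun (st : List Int × Int) r =>
          (PySem.List.pySetD st.1 (r * shard_dim + out_col) st.2, st.2 + 1)) st) st
    (PySem.List.pyRange 0 b_r 1).foldl (fun st j =>
      let out_col := x_shard + b_shard + k * b_r + j
      (PySem.List.pyRange 0 conv_rows 1).foldl
        (fun (st : List Int × Int) r =>
          (PySem.List.pySetD st.1 (r * shard_dim + out_col) st.2, st.2 + 1)) st) st)
    (inv_perm, 0)
  st.1

-- ===== PORT B =====
def build_chunk_perm_inverse_alt (conv_rows : Int) (x_shard : Int) (b_shard : Int) : List Int :=
  let g : Int := Int.gcd x_shard b_shard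
  let x_r := PySem.Int.floordiv x_shard g
  let b_r := PySem.Int.floordiv b_shard g
  let chunk := x_r + 2 * b_r
  let shard_dim := x_shard + 2 * b_shard
  let inv : List Int := List.replicate (conv_rows * shard_dim).toNat 0
  (PySem.List.pyRange 0 (conv_rows * shard_dim) 1).foldl (fun inv i =>
    let r := PySem.Int.floordiv i shard_dim
    let c := PySem.Int.mod i shard_dim
    let pos :=
      if c < x_shard then
        PySem.Int.floordiv c x_r * chunk + PySem.Int.mod c x_r
      else if c < x_shard + b_shard then
        PySem.Int.floordiv (c - x_shard) b_r * chunk + x_r + PySem.Int.mod (c - x_shard) b_r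
      else
        PySem.Int.floordiv (c - x_shard - b_shard) b_r * chunk + x_r + b_r
          + PySem.Int.mod (c - x_shard - b_shard) b_r
    PySem.List.pySetD inv i (pos * conv_rows + r)) inv

-- ===== PRECONDITION & SPEC =====
-- Pre_ excludes the inputs on which A raises (both widths zero: ZeroDivisionError;
-- mixed-sign widths with positive conv_rows: IndexError in almost all cases), and two
-- corners where A happens to return an accidental value no re-implementation should
-- match: mixed-sign widths where A's value comes from Python's negative-index
-- wraparound, and negative conv_rows with negative total width, where A returns a
-- positive-length all-zero list only because its loops never run (see cites).
def Pre_build_chunk_perm_inverse (conv_rows : Int) (x_shard : Int) (b_shard : Int) : Prop :=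
  (x_shard ≠ 0 ∨ b_shard ≠ 0) ∧
    (conv_rows ≤ 0 ∨ (0 ≤ x_shard ∧ 0 ≤ b_shard) ∨ (x_shard ≤ 0 ∧ b_shard ≤ 0)) ∧
    ¬ (conv_rows < 0 ∧ x_shard + 2 * b_shard < 0)
instance (conv_rows : Int) (x_shard : Int) (b_shard : Int) : Decidable (Pre_build_chunk_perm_inverse conv_rows x_shard b_shard) := by unfold Pre_build_chunk_perm_inverse; infer_instance
def pvWitness_build_chunk_perm_inverse : Int × Int × Int := (3, 4, 2)

def Spec_build_chunk_perm_inverse (conv_rows : Int) (x_shard : Int) (b_shard : Int) (out : List Int) : Prop := out = build_chunk_perm_inverse_alt conv_rows x_shard b_shard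
instance (conv_rows : Int) (x_shard : Int) (b_shard : Int) (out : List Int) : Decidable (Spec_build_chunk_perm_inverse conv_rows x_shard b_shard out) := by unfold Spec_build_chunk_perm_inverse; infer_instance

-- ===== CLAIM (what is proved, stated in full; the proofs are below) =====
def Claim_equal_build_chunk_perm_inverse : Prop := ∀ (conv_rows : Int) (x_shard : Int) (b_shard : Int), Dom_build_chunk_perm_inverse conv_rows x_shard b_shard → Pre_build_chunk_perm_inverse conv_rows x_shard b_shard → Spec_build_chunk_perm_inverse conv_rows x_shard b_shard (build_chunk_perm_inverse conv_rows x_shard b_shard)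

-- ===== LEMMAS AND PROOFS =====

/-- The common write step: `pySetD` at position `pv.1` with value `pv.2`. -/
def pvStep (inv : List Int) (pv : Int × Int) : List Int :=
  PySem.List.pySetD inv pv.1 pv.2

/-- Column visited at received column-slot `t` (Nat model of A's out_col). -/
def pvColN (g xr br : Nat) (t : Nat) : Nat :=
  if t % (xr + 2 * br) < xr then t / (xr + 2 * br) * xr + t % (xr + 2 * br)
  else if t % (xr + 2 * br) < xr + br then
    g * xr + t / (xr + 2 * br) * br + (t % (xr + 2 * br) - xr)
  else g * xr + g * br + t / (xr + 2 * br) * br + (t % (xr + 2 * br) - xr - br)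

/-- Write position of A's `p`-th write (Nat model). -/
def pvPosA (g xr br cr : Nat) (p : Nat) : Nat :=
  p % cr * (g * (xr + 2 * br)) + pvColN g xr br (p / cr)

/-- Received position of column `c` (Nat model of B's closed form). -/
def pvPosC (g xr br : Nat) (c : Nat) : Nat :=
  if c < g * xr then c / xr * (xr + 2 * br) + c % xr
  else if c < g * xr + g * br then
    (c - g * xr) / br * (xr + 2 * br) + xr + (c - g * xr) % br
  else (c - g * xr - g * br) / br * (xr + 2 * br) + xr + br + (c - g * xr - g * br) % br

/-- Value B writes at flat output index `i` (Nat model). -/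
def pvValB (g xr br cr : Nat) (i : Nat) : Nat :=
  pvPosC g xr br (i % (g * (xr + 2 * br))) * cr + i / (g * (xr + 2 * br))

lemma pv_foldl_flatMap {α β σ : Type} (f : σ → β → σ) (g : α → List β) (l : List α) (init : σ) :
    (l.flatMap g).foldl f init = l.foldl (fun s a => (g a).foldl f s) init := by
  induction l generalizing init with
  | nil => rfl
  | cons a l ih => simp [List.foldl_append, ih]

lemma pv_map_range_append {α : Type} (f g : Nat → α) (a b : Nat) :
    (List.range a).map f ++ (List.range b).map g
      = (List.range (a + b)).map (fun s => if s < a then f s else g (s - a)) := by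
  rw [List.range_add, List.map_append, List.map_map]
  congr 1
  · exact (List.map_congr_left fun s hs => by
      simp [List.mem_range] at hs; simp [hs]).symm
  · exact (List.map_congr_left fun s _ => by
      simp [Function.comp]).symm

lemma pv_flatMap_range_map {α : Type} (f : Nat → Nat → α) (m c : Nat) :
    (List.range m).flatMap (fun t => (List.range c).map (f t))
      = (List.range (m * c)).map (fun p => f (p / c) (p % c)) := by
  induction m with
  | zero => simp
  | succ m ih =>
      rw [List.range_succ, List.flatMap_append, ih, Nat.succ_mul, List.range_add,
        List.map_append, List.map_map]
      congr 1
      simp only [List.flatMap_cons, List.flatMap_nil, List.append_nil]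
      refine List.map_congr_left fun r hr => ?_
      simp only [List.mem_range] at hr
      have hdiv : (m * c + r) / c = m := by
        rw [Nat.mul_comm m c, Nat.mul_add_div (by omega), Nat.div_eq_of_lt hr]
        omega
      have hmod : (m * c + r) % c = r := by
        rw [Nat.mul_comm m c, Nat.mul_add_mod, Nat.mod_eq_of_lt hr]
      simp [Function.comp, hdiv, hmod]

lemma pv_enum_swap {α : Type} (f : Nat → α) (N : Nat) :
    (PySem.List.enumerate ((List.range N).map f) 0).map (fun pq => (pq.2, pq.1))
      = (List.range N).map (fun p => (f p, (p : Int))) := by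
  apply List.ext_getElem
  · simp [PySem.List.length_enumerate]
  · intro k h1 h2
    simp [PySem.List.getElem_enumerate]

lemma pv_perm_of_nodup_mem {α : Type} [DecidableEq α] (l1 l2 : List α)
    (h1 : l1.Nodup) (h2 : l2.Nodup) (h : ∀ a, a ∈ l1 ↔ a ∈ l2) : l1.Perm l2 := by
  rw [List.perm_iff_count]
  intro a
  by_cases hm : a ∈ l1
  · rw [List.count_eq_one_of_mem h1 hm, List.count_eq_one_of_mem h2 ((h a).mp hm)]
  · rw [List.count_eq_zero_of_not_mem hm,
      List.count_eq_zero_of_not_mem (fun hc => hm ((h a).mpr hc))]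

lemma pv_step_comm (l : List Int) (p q : Int × Int) (hp : 0 ≤ p.1) (hq : 0 ≤ q.1)
    (hne : p.1 ≠ q.1) : pvStep (pvStep l p) q = pvStep (pvStep l q) p := by
  simp only [pvStep, PySem.List.pySetD_of_nonneg _ _ hp, PySem.List.pySetD_of_nonneg _ _ hq]
  exact (List.set_comm _ _ (by omega)).symm

-- ===== core Nat arithmetic: pvPosC inverts pvColN and vice versa =====

lemma pv_div_eq (k s d : Nat) (h : s < d) : (k * d + s) / d = k := by
  rw [Nat.mul_comm, Nat.mul_add_div (by omega), Nat.div_eq_of_lt h]; omega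

lemma pv_mod_eq (k s d : Nat) (h : s < d) : (k * d + s) % d = s := by
  rw [Nat.mul_comm, Nat.mul_add_mod, Nat.mod_eq_of_lt h]

lemma pvColN_spec (g xr br : Nat) {t : Nat} (ht : t < g * (xr + 2 * br)) :
    pvColN g xr br t < g * (xr + 2 * br) ∧ pvPosC g xr br (pvColN g xr br t) = t := by
  have hpos : 0 < g * (xr + 2 * br) := by omega
  have hch : 0 < xr + 2 * br := Nat.pos_of_ne_zero (fun h => by simp [h] at hpos)
  have hks : (xr + 2 * br) * (t / (xr + 2 * br)) + t % (xr + 2 * br) = t :=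
    Nat.div_add_mod t (xr + 2 * br)
  have hslt : t % (xr + 2 * br) < xr + 2 * br := Nat.mod_lt _ hch
  have hklt : t / (xr + 2 * br) < g := Nat.div_lt_iff_lt_mul hch |>.mpr ht
  set k := t / (xr + 2 * br) with hk
  set s := t % (xr + 2 * br) with hs
  have hx1 : (k + 1) * xr ≤ g * xr := Nat.mul_le_mul_right _ hklt
  have hb1 : (k + 1) * br ≤ g * br := Nat.mul_le_mul_right _ hklt
  have hgx : g * (xr + 2 * br) = g * xr + (g * br + g * br) := by ring
  have hsx : (k + 1) * xr = k * xr + xr := by ring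
  have hsb : (k + 1) * br = k * br + br := by ring
  have hcm : (xr + 2 * br) * k = k * (xr + 2 * br) := Nat.mul_comm _ _
  unfold pvColN
  rw [← hk, ← hs]
  split_ifs with h1 h2
  · have hcol : k * xr + s < g * xr := by omega
    unfold pvPosC
    rw [if_pos hcol, pv_div_eq _ _ _ h1, pv_mod_eq _ _ _ h1]
    constructor <;> omega
  · have hc1 : ¬ (g * xr + k * br + (s - xr) < g * xr) := by omega
    have hc2 : g * xr + k * br + (s - xr) < g * xr + g * br := by omega
    unfold pvPosC
    rw [if_neg hc1, if_pos hc2]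
    have hd : g * xr + k * br + (s - xr) - g * xr = k * br + (s - xr) := by omega
    rw [hd, pv_div_eq _ _ _ (by omega), pv_mod_eq _ _ _ (by omega)]
    constructor <;> omega
  · have hc1 : ¬ (g * xr + g * br + k * br + (s - xr - br) < g * xr) := by omega
    have hc2 : ¬ (g * xr + g * br + k * br + (s - xr - br) < g * xr + g * br) := by omega
    unfold pvPosC
    rw [if_neg hc1, if_neg hc2]
    have hd : g * xr + g * br + k * br + (s - xr - br) - g * xr - g * br = k * br + (s - xr - br) := by omega
    rw [hd, pv_div_eq _ _ _ (by omega), pv_mod_eq _ _ _ (by omega)]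
    constructor <;> omega

lemma pvPosC_spec (g xr br : Nat) {c : Nat} (hc : c < g * (xr + 2 * br)) :
    pvPosC g xr br c < g * (xr + 2 * br) ∧ pvColN g xr br (pvPosC g xr br c) = c := by
  have hpos : 0 < g * (xr + 2 * br) := by omega
  have hgx : g * (xr + 2 * br) = g * xr + (g * br + g * br) := by ring
  unfold pvPosC
  split_ifs with h1 h2
  · have hxr : 0 < xr := by
      rcases Nat.eq_zero_or_pos xr with h | h
      · simp [h] at h1
      · exact h
    have hklt : c / xr < g := Nat.div_lt_iff_lt_mul hxr |>.mpr h1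
    have hslt : c % xr < xr := Nat.mod_lt _ hxr
    have hdm : xr * (c / xr) + c % xr = c := Nat.div_add_mod c xr
    set k := c / xr with hk
    set s := c % xr with hs
    have hcm : xr * k = k * xr := Nat.mul_comm _ _
    have hx1 : (k + 1) * (xr + 2 * br) ≤ g * (xr + 2 * br) := Nat.mul_le_mul_right _ hklt
    have hsx : (k + 1) * (xr + 2 * br) = k * (xr + 2 * br) + (xr + 2 * br) := by ring
    refine ⟨by omega, ?_⟩
    unfold pvColN
    rw [pv_div_eq _ _ _ (by omega), pv_mod_eq _ _ _ (by omega), if_pos (by omega)]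
    omega
  · set d := c - g * xr with hd
    have hdlt : d < g * br := by omega
    have hbr : 0 < br := by
      rcases Nat.eq_zero_or_pos br with h | h
      · rw [h] at hdlt; omega
      · exact h
    have hklt : d / br < g := Nat.div_lt_iff_lt_mul hbr |>.mpr hdlt
    have hjlt : d % br < br := Nat.mod_lt _ hbr
    have hdm : br * (d / br) + d % br = d := Nat.div_add_mod d br
    set k := d / br with hk
    set j := d % br with hj
    have hcm : br * k = k * br := Nat.mul_comm _ _
    have hx1 : (k + 1) * (xr + 2 * br) ≤ g * (xr + 2 * br) := Nat.mul_le_mul_right _ hklt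
    have hsx : (k + 1) * (xr + 2 * br) = k * (xr + 2 * br) + (xr + 2 * br) := by ring
    have hk1 : (k + 1) * br ≤ g * br := Nat.mul_le_mul_right _ hklt
    have hsb : (k + 1) * br = k * br + br := by ring
    refine ⟨by omega, ?_⟩
    unfold pvColN
    have hassoc : k * (xr + 2 * br) + xr + j = k * (xr + 2 * br) + (xr + j) := by omega
    rw [hassoc, pv_div_eq _ _ _ (by omega), pv_mod_eq _ _ _ (by omega),
      if_neg (by omega), if_pos (by omega)]
    omega
  · set e := c - g * xr - g * br with he
    have helt : e < g * br := by omega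
    have hbr : 0 < br := by
      rcases Nat.eq_zero_or_pos br with h | h
      · rw [h] at helt; omega
      · exact h
    have hklt : e / br < g := Nat.div_lt_iff_lt_mul hbr |>.mpr helt
    have hjlt : e % br < br := Nat.mod_lt _ hbr
    have hdm : br * (e / br) + e % br = e := Nat.div_add_mod e br
    set k := e / br with hk
    set j := e % br with hj
    have hcm : br * k = k * br := Nat.mul_comm _ _
    have hx1 : (k + 1) * (xr + 2 * br) ≤ g * (xr + 2 * br) := Nat.mul_le_mul_right _ hklt
    have hsx : (k + 1) * (xr + 2 * br) = k * (xr + 2 * br) + (xr + 2 * br) := by ring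
    have hk1 : (k + 1) * br ≤ g * br := Nat.mul_le_mul_right _ hklt
    have hsb : (k + 1) * br = k * br + br := by ring
    refine ⟨by omega, ?_⟩
    unfold pvColN
    have hassoc : k * (xr + 2 * br) + xr + br + j = k * (xr + 2 * br) + (xr + br + j) := by omega
    rw [hassoc, pv_div_eq _ _ _ (by omega), pv_mod_eq _ _ _ (by omega),
      if_neg (by omega), if_neg (by omega)]
    omega

lemma pvPosA_spec (g xr br cr : Nat) {p : Nat} (hp : p < g * (xr + 2 * br) * cr) :
    pvPosA g xr br cr p < g * (xr + 2 * br) * cr ∧ pvValB g xr br cr (pvPosA g xr br cr p) = p := by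
  have hpos : 0 < g * (xr + 2 * br) * cr := by omega
  have hcr : 0 < cr := by
    rcases Nat.eq_zero_or_pos cr with h | h
    · rw [h] at hp; omega
    · exact h
  have htlt : p / cr < g * (xr + 2 * br) := Nat.div_lt_iff_lt_mul hcr |>.mpr hp
  have hrlt : p % cr < cr := Nat.mod_lt _ hcr
  have hdm : cr * (p / cr) + p % cr = p := Nat.div_add_mod p cr
  obtain ⟨hcol_lt, hcol_inv⟩ := pvColN_spec g xr br htlt
  set t := p / cr with ht
  set r := p % cr with hr
  set col := pvColN g xr br t with hcol
  have hx1 : (r + 1) * (g * (xr + 2 * br)) ≤ cr * (g * (xr + 2 * br)) := Nat.mul_le_mul_right _ hrlt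
  have hsx : (r + 1) * (g * (xr + 2 * br)) = r * (g * (xr + 2 * br)) + g * (xr + 2 * br) := by ring
  have hcm : cr * (g * (xr + 2 * br)) = g * (xr + 2 * br) * cr := Nat.mul_comm _ _
  constructor
  · unfold pvPosA
    rw [← ht, ← hr, ← hcol]
    omega
  · unfold pvValB pvPosA
    rw [← ht, ← hr, ← hcol]
    rw [pv_div_eq _ _ _ hcol_lt, pv_mod_eq _ _ _ hcol_lt, hcol, hcol_inv]
    have hcm2 : cr * t = t * cr := Nat.mul_comm _ _
    omega

lemma pvValB_spec (g xr br cr : Nat) {i : Nat} (hi : i < g * (xr + 2 * br) * cr) :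
    pvValB g xr br cr i < g * (xr + 2 * br) * cr ∧ pvPosA g xr br cr (pvValB g xr br cr i) = i := by
  have hpos : 0 < g * (xr + 2 * br) * cr := by omega
  have hsd : 0 < g * (xr + 2 * br) := by
    rcases Nat.eq_zero_or_pos (g * (xr + 2 * br)) with h | h
    · rw [h] at hi; omega
    · exact h
  have hrlt : i / (g * (xr + 2 * br)) < cr := by
    refine Nat.div_lt_iff_lt_mul hsd |>.mpr ?_
    calc i < g * (xr + 2 * br) * cr := hi
    _ = cr * (g * (xr + 2 * br)) := Nat.mul_comm _ _
  have hclt : i % (g * (xr + 2 * br)) < g * (xr + 2 * br) := Nat.mod_lt _ hsd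
  have hdm : g * (xr + 2 * br) * (i / (g * (xr + 2 * br))) + i % (g * (xr + 2 * br)) = i :=
    Nat.div_add_mod i (g * (xr + 2 * br))
  obtain ⟨hpos_lt, hpos_inv⟩ := pvPosC_spec g xr br hclt
  set r := i / (g * (xr + 2 * br)) with hr
  set c := i % (g * (xr + 2 * br)) with hc
  set q := pvPosC g xr br c with hq
  have hx1 : (q + 1) * cr ≤ g * (xr + 2 * br) * cr := Nat.mul_le_mul_right _ hpos_lt
  have hsx : (q + 1) * cr = q * cr + cr := by ring
  constructor
  · unfold pvValB
    rw [← hc, ← hr, ← hq]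
    omega
  · unfold pvPosA pvValB
    rw [← hc, ← hr, ← hq]
    rw [pv_div_eq _ _ _ hrlt, pv_mod_eq _ _ _ hrlt, hq, hpos_inv]
    have hcm : r * (g * (xr + 2 * br)) = g * (xr + 2 * br) * r := Nat.mul_comm _ _
    omega

-- ===== the permutation between A's writes and B's writes =====

lemma pv_ws_perm (g xr br cr : Nat) :
    ((List.range (g * (xr + 2 * br) * cr)).map
        (fun (p : Nat) => ((pvPosA g xr br cr p : Int), (p : Int)))).Perm
      ((List.range (g * (xr + 2 * br) * cr)).map
        (fun (i : Nat) => ((i : Int), (pvValB g xr br cr i : Int)))) := by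
  apply pv_perm_of_nodup_mem
  · refine List.Nodup.map_on ?_ (List.nodup_range)
    intro p _ q _ hpq
    have h2 : (p : Int) = (q : Int) := congrArg Prod.snd hpq
    exact_mod_cast h2
  · refine List.Nodup.map_on ?_ (List.nodup_range)
    intro p _ q _ hpq
    have h2 : (p : Int) = (q : Int) := congrArg Prod.fst hpq
    exact_mod_cast h2
  · intro a
    simp only [List.mem_map, List.mem_range]
    constructor
    · rintro ⟨p, hp, rfl⟩
      exact ⟨pvPosA g xr br cr p, (pvPosA_spec g xr br cr hp).1,
        by rw [(pvPosA_spec g xr br cr hp).2]⟩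
    · rintro ⟨i, hi, rfl⟩
      exact ⟨pvValB g xr br cr i, (pvValB_spec g xr br cr hi).1,
        by rw [(pvValB_spec g xr br cr hi).2]⟩

-- ===== scatter machinery shared with A's reduction =====

def pvScat (sd cr : Int) (st : List Int × Int) (col : Int) : List Int × Int :=
  (PySem.List.pyRange 0 cr 1).foldl
    (fun (st : List Int × Int) r => (PySem.List.pySetD st.1 (r * sd + col) st.2, st.2 + 1)) st

lemma pv_scat_enum (sd col : Int) (rs : List Int) (inv : List Int) (p : Int) :
    rs.foldl (fun (st : List Int × Int) r => (PySem.List.pySetD st.1 (r * sd + col) st.2, st.2 + 1)) (inv, p)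
      = ((PySem.List.enumerate (rs.map (fun r => r * sd + col)) p).foldl
           (fun inv pq => PySem.List.pySetD inv pq.2 pq.1) inv,
         p + rs.length) := by
  induction rs generalizing inv p with
  | nil => simp
  | cons r rs ih =>
      simp only [List.foldl_cons, List.map_cons, PySem.List.enumerate_cons, ih,
        List.length_cons, Prod.mk.injEq]
      exact ⟨by trivial, by push_cast; ring⟩

lemma pv_main (sd cr : Int) (cols : List Int) (inv : List Int) (p : Int) :
    cols.foldl (pvScat sd cr) (inv, p)
      = ((PySem.List.enumerate
            (cols.flatMap (fun col => (PySem.List.pyRange 0 cr 1).map (fun r => r * sd + col))) p).foldl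
           (fun inv pq => PySem.List.pySetD inv pq.2 pq.1) inv,
         p + (cols.flatMap (fun col => (PySem.List.pyRange 0 cr 1).map (fun r => r * sd + col))).length) := by
  induction cols generalizing inv p with
  | nil => simp
  | cons col cols ih =>
      simp only [List.foldl_cons, List.flatMap_cons, PySem.List.enumerate_append,
        List.foldl_append, List.length_append]
      rw [pvScat, pv_scat_enum, ih]
      simp only [List.length_map, Prod.mk.injEq]
      exact ⟨by trivial, by push_cast; ring⟩


-- ===== reduction of the two ports to write lists =====

lemma pv_B_writes (cr : Int) (gn xr br : Nat)
    (hgn : Int.gcd ((gn * xr : Nat) : Int) ((gn * br : Nat) : Int) = gn) (hgpos : 0 < gn) :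
    build_chunk_perm_inverse_alt cr ((gn * xr : Nat) : Int) ((gn * br : Nat) : Int)
      = ((List.range (gn * (xr + 2 * br) * cr.toNat)).map
            (fun (i : Nat) => ((i : Int), (pvValB gn xr br cr.toNat i : Int)))).foldl pvStep
          (List.replicate (cr * (((gn * xr : Nat) : Int) + 2 * ((gn * br : Nat) : Int))).toNat 0) := by
  have hgc : ((Int.gcd ((gn * xr : Nat) : Int) ((gn * br : Nat) : Int) : Nat) : Int) = ((gn : Nat) : Int) := by
    exact_mod_cast hgn
  have hxr : PySem.Int.floordiv ((gn * xr : Nat) : Int) ((gn : Nat) : Int) = ((xr : Nat) : Int) := by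
    rw [PySem.Int.floordiv_natCast, Nat.mul_div_cancel_left _ hgpos]
  have hbr : PySem.Int.floordiv ((gn * br : Nat) : Int) ((gn : Nat) : Int) = ((br : Nat) : Int) := by
    rw [PySem.Int.floordiv_natCast, Nat.mul_div_cancel_left _ hgpos]
  have hsd : (((gn * xr : Nat) : Int) + 2 * ((gn * br : Nat) : Int)) = ((gn * (xr + 2 * br) : Nat) : Int) := by
    push_cast; ring
  have hNN : (cr * ((gn * (xr + 2 * br) : Nat) : Int)).toNat = gn * (xr + 2 * br) * cr.toNat := by
    rcases (by omega : 0 ≤ cr ∨ cr < 0) with h | h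
    · have hc : cr = ((cr.toNat : Nat) : Int) := by omega
      rw [hc, ← Nat.cast_mul, Int.toNat_natCast, Nat.mul_comm, Int.toNat_natCast]
    · have hs : (0 : Int) ≤ ((gn * (xr + 2 * br) : Nat) : Int) := Int.natCast_nonneg _
      have h1 : cr * ((gn * (xr + 2 * br) : Nat) : Int) ≤ 0 :=
        mul_nonpos_iff.mpr (Or.inr ⟨le_of_lt h, hs⟩)
      have h2 : cr.toNat = 0 := by omega
      rw [h2, Nat.mul_zero]
      omega
  unfold build_chunk_perm_inverse_alt
  simp only [hgc, hxr, hbr, hsd]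
  rw [PySem.List.pyRange_one]
  simp only [sub_zero, zero_add, hNN, List.foldl_map]
  refine PySem.List.foldl_congr_mem _ _ _ _ ?_
  intro inv i hi
  simp only [List.mem_range] at hi
  have hN : 0 < gn * (xr + 2 * br) * cr.toNat := by omega
  have hsdpos : 0 < gn * (xr + 2 * br) := by
    rcases Nat.eq_zero_or_pos (gn * (xr + 2 * br)) with h | h
    · rw [h] at hN; omega
    · exact h
  have hcrpos : 0 < cr.toNat := by
    rcases Nat.eq_zero_or_pos cr.toNat with h | h
    · rw [h] at hN; omega
    · exact h
  have hcr : cr = ((cr.toNat : Nat) : Int) := by omega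
  show PySem.List.pySetD inv _ _ = pvStep inv _
  unfold pvStep
  rw [PySem.Int.floordiv_natCast, PySem.Int.mod_natCast]
  refine congrArg (PySem.List.pySetD inv ((i : Nat) : Int)) ?_
  have hcn : i % (gn * (xr + 2 * br)) < gn * (xr + 2 * br) := Nat.mod_lt _ hsdpos
  set sdn := gn * (xr + 2 * br) with hsdn
  set cn := i % sdn with hcn'
  set rn := i / sdn with hrn'
  show _ = ((pvValB gn xr br cr.toNat i : Nat) : Int)
  unfold pvValB pvPosC
  rw [← hcn', ← hrn']
  rw [hcr]
  by_cases h1 : cn < gn * xr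
  · rw [if_pos (by exact_mod_cast h1), if_pos h1,
      PySem.Int.floordiv_natCast, PySem.Int.mod_natCast]
    push_cast [Int.toNat_natCast]; ring
  · have h1' : ¬ (((cn : Nat) : Int) < ((gn * xr : Nat) : Int)) := by exact_mod_cast h1
    have hsub1 : (((cn : Nat) : Int) - ((gn * xr : Nat) : Int)) = (((cn - gn * xr : Nat) : Nat) : Int) := by
      rw [Nat.cast_sub (by omega)]
    by_cases h2 : cn < gn * xr + gn * br
    · have h2' : (((cn : Nat) : Int) < ((gn * xr : Nat) : Int) + ((gn * br : Nat) : Int)) := by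
        exact_mod_cast h2
      rw [if_neg h1', if_pos h2', if_neg h1, if_pos h2, hsub1,
        PySem.Int.floordiv_natCast, PySem.Int.mod_natCast]
      push_cast [Int.toNat_natCast]; ring
    · have h2' : ¬ (((cn : Nat) : Int) < ((gn * xr : Nat) : Int) + ((gn * br : Nat) : Int)) := by
        intro hc
        exact h2 (by exact_mod_cast hc)
      have hsub2 : (((cn : Nat) : Int) - ((gn * xr : Nat) : Int) - ((gn * br : Nat) : Int))
          = (((cn - gn * xr - gn * br : Nat) : Nat) : Int) := by
        rw [Nat.cast_sub (by omega), Nat.cast_sub (by omega)]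
      rw [if_neg h1', if_neg h2', if_neg h1, if_neg h2, hsub2,
        PySem.Int.floordiv_natCast, PySem.Int.mod_natCast]
      push_cast [Int.toNat_natCast]; ring

lemma pv_fwd_eq (gn xr br : Nat) (cr : Int) :
    ((PySem.List.pyRange 0 ((gn : Nat) : Int) 1).flatMap (fun k =>
        (PySem.List.pyRange 0 ((xr : Nat) : Int) 1).map (fun j => k * ((xr : Nat) : Int) + j)
        ++ (PySem.List.pyRange 0 ((br : Nat) : Int) 1).map (fun j => ((gn * xr : Nat) : Int) + k * ((br : Nat) : Int) + j)
        ++ (PySem.List.pyRange 0 ((br : Nat) : Int) 1).map (fun j => ((gn * xr : Nat) : Int) + ((gn * br : Nat) : Int) + k * ((br : Nat) : Int) + j))).flatMap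
      (fun col => (PySem.List.pyRange 0 cr 1).map (fun r => r * ((gn * (xr + 2 * br) : Nat) : Int) + col))
    = (List.range (gn * (xr + 2 * br) * cr.toNat)).map (fun p => ((pvPosA gn xr br cr.toNat p : Nat) : Int)) := by
  simp only [PySem.List.pyRange_one, sub_zero, Int.toNat_natCast, zero_add, List.map_map,
    List.flatMap_map, Function.comp_def]
  rw [List.flatMap_assoc]
  simp only [List.flatMap_append, List.flatMap_map]
  have hblk : ∀ kn ∈ List.range gn,
      (List.range xr).flatMap (fun a => (List.range cr.toNat).map (fun x => ((x : Nat) : Int) * ((gn * (xr + 2 * br) : Nat) : Int) + (((kn : Nat) : Int) * ((xr : Nat) : Int) + ((a : Nat) : Int))))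
      ++ (List.range br).flatMap (fun a => (List.range cr.toNat).map (fun x => ((x : Nat) : Int) * ((gn * (xr + 2 * br) : Nat) : Int) + (((gn * xr : Nat) : Int) + ((kn : Nat) : Int) * ((br : Nat) : Int) + ((a : Nat) : Int))))
      ++ (List.range br).flatMap (fun a => (List.range cr.toNat).map (fun x => ((x : Nat) : Int) * ((gn * (xr + 2 * br) : Nat) : Int) + (((gn * xr : Nat) : Int) + ((gn * br : Nat) : Int) + ((kn : Nat) : Int) * ((br : Nat) : Int) + ((a : Nat) : Int))))
      = (fun kn : Nat =>
      (List.range (xr * cr.toNat + br * cr.toNat + br * cr.toNat)).map (fun s =>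
        if s < xr * cr.toNat + br * cr.toNat then
          (if s < xr * cr.toNat then
            ((s % cr.toNat : Nat) : Int) * ((gn * (xr + 2 * br) : Nat) : Int)
              + (((kn : Nat) : Int) * ((xr : Nat) : Int) + ((s / cr.toNat : Nat) : Int))
          else
            (((s - xr * cr.toNat) % cr.toNat : Nat) : Int) * ((gn * (xr + 2 * br) : Nat) : Int)
              + (((gn * xr : Nat) : Int) + ((kn : Nat) : Int) * ((br : Nat) : Int)
                + (((s - xr * cr.toNat) / cr.toNat : Nat) : Int)))
        else
          (((s - (xr * cr.toNat + br * cr.toNat)) % cr.toNat : Nat) : Int) * ((gn * (xr + 2 * br) : Nat) : Int)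
            + (((gn * xr : Nat) : Int) + ((gn * br : Nat) : Int) + ((kn : Nat) : Int) * ((br : Nat) : Int)
              + (((s - (xr * cr.toNat + br * cr.toNat)) / cr.toNat : Nat) : Int))) ) kn := by
    intro kn _
    rw [pv_flatMap_range_map (fun a x1 => ((x1 : Nat) : Int) * ((gn * (xr + 2 * br) : Nat) : Int)
          + (((kn : Nat) : Int) * ((xr : Nat) : Int) + ((a : Nat) : Int))) xr cr.toNat,
        pv_flatMap_range_map (fun a x1 => ((x1 : Nat) : Int) * ((gn * (xr + 2 * br) : Nat) : Int)
          + (((gn * xr : Nat) : Int) + ((kn : Nat) : Int) * ((br : Nat) : Int) + ((a : Nat) : Int))) br cr.toNat,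
        pv_flatMap_range_map (fun a x1 => ((x1 : Nat) : Int) * ((gn * (xr + 2 * br) : Nat) : Int)
          + (((gn * xr : Nat) : Int) + ((gn * br : Nat) : Int) + ((kn : Nat) : Int) * ((br : Nat) : Int) + ((a : Nat) : Int))) br cr.toNat,
        pv_map_range_append, pv_map_range_append]
  rw [List.flatMap_congr hblk]
  rw [pv_flatMap_range_map (fun kn s =>
      if s < xr * cr.toNat + br * cr.toNat then
        (if s < xr * cr.toNat then
          ((s % cr.toNat : Nat) : Int) * ((gn * (xr + 2 * br) : Nat) : Int)
            + (((kn : Nat) : Int) * ((xr : Nat) : Int) + ((s / cr.toNat : Nat) : Int))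
        else
          (((s - xr * cr.toNat) % cr.toNat : Nat) : Int) * ((gn * (xr + 2 * br) : Nat) : Int)
            + (((gn * xr : Nat) : Int) + ((kn : Nat) : Int) * ((br : Nat) : Int)
              + (((s - xr * cr.toNat) / cr.toNat : Nat) : Int)))
      else
        (((s - (xr * cr.toNat + br * cr.toNat)) % cr.toNat : Nat) : Int) * ((gn * (xr + 2 * br) : Nat) : Int)
          + (((gn * xr : Nat) : Int) + ((gn * br : Nat) : Int) + ((kn : Nat) : Int) * ((br : Nat) : Int)
            + (((s - (xr * cr.toNat + br * cr.toNat)) / cr.toNat : Nat) : Int)))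
    gn (xr * cr.toNat + br * cr.toNat + br * cr.toNat)]
  rw [show gn * (xr * cr.toNat + br * cr.toNat + br * cr.toNat) = gn * (xr + 2 * br) * cr.toNat by ring]
  refine List.map_congr_left fun p hp => ?_
  simp only [List.mem_range] at hp
  have hN : 0 < gn * (xr + 2 * br) * cr.toNat := by omega
  have hchpos : 0 < xr + 2 * br := by
    rcases Nat.eq_zero_or_pos (xr + 2 * br) with h | h
    · rw [h] at hN; simp at hN
    · exact h
  have hcrpos : 0 < cr.toNat := by
    rcases Nat.eq_zero_or_pos cr.toNat with h | h
    · rw [h] at hN; simp at hN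
    · exact h
  set crn := cr.toNat with hcrn
  set ch := xr + 2 * br with hch
  have hS : xr * crn + br * crn + br * crn = ch * crn := by rw [hch]; ring
  have hdd : p / (xr * crn + br * crn + br * crn) = p / crn / ch := by
    rw [hS, Nat.div_div_eq_div_mul, Nat.mul_comm crn ch]
  have hsdiv : p % (xr * crn + br * crn + br * crn) / crn = p / crn % ch := by
    rw [hS, Nat.mul_comm ch crn, Nat.mod_mul_right_div_self]
  have hsmod : p % (xr * crn + br * crn + br * crn) % crn = p % crn := by
    rw [hS, Nat.mul_comm ch crn, Nat.mod_mul_right_mod]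
  set s := p % (xr * crn + br * crn + br * crn) with hs
  set t := p / crn with ht
  have hdm : crn * (s / crn) + s % crn = s := Nat.div_add_mod s crn
  have hmodlt : s % crn < crn := Nat.mod_lt _ hcrpos
  have htch : t % ch < ch := Nat.mod_lt _ hchpos
  unfold pvPosA pvColN
  rw [← ht, ← hch]
  by_cases h1 : t % ch < xr
  · have hc1 : s < xr * crn := by
      have : s / crn < xr := by rw [hsdiv]; exact h1
      calc s < crn * (s / crn) + crn := by omega
      _ ≤ crn * xr := by
        have : s / crn + 1 ≤ xr := this
        calc crn * (s / crn) + crn = crn * (s / crn + 1) := by ring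
        _ ≤ crn * xr := Nat.mul_le_mul_left _ this
      _ = xr * crn := Nat.mul_comm _ _
    rw [if_pos (by omega : s < xr * crn + br * crn), if_pos hc1, if_pos h1]
    rw [hsmod, hsdiv, hdd]
    push_cast; ring
  · by_cases h2 : t % ch < xr + br
    · have hge : xr * crn ≤ s := by
        have hx : xr ≤ s / crn := by rw [hsdiv]; omega
        calc xr * crn = crn * xr := Nat.mul_comm _ _
        _ ≤ crn * (s / crn) := Nat.mul_le_mul_left _ hx
        _ ≤ s := Nat.mul_div_le s crn |>.trans_eq rfl
      have hlt : s < xr * crn + br * crn := by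
        have hx : s / crn < xr + br := by rw [hsdiv]; exact h2
        calc s < crn * (s / crn) + crn := by omega
        _ ≤ crn * (xr + br) := by
          calc crn * (s / crn) + crn = crn * (s / crn + 1) := by ring
          _ ≤ crn * (xr + br) := Nat.mul_le_mul_left _ hx
        _ = xr * crn + br * crn := by ring
      have hc1 : ¬ (s < xr * crn) := by omega
      have hrepr : s - xr * crn = (s / crn - xr) * crn + s % crn := by
        have hx : xr ≤ s / crn := by rw [hsdiv]; omega
        have h3 : (s / crn - xr) * crn = s / crn * crn - xr * crn := Nat.sub_mul _ _ _
        have h4 : s / crn * crn = crn * (s / crn) := Nat.mul_comm _ _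
        have h7 : xr * crn ≤ s / crn * crn := Nat.mul_le_mul_right _ hx
        omega
      rw [if_pos (by omega : s < xr * crn + br * crn), if_neg hc1]
      rw [if_neg h1, if_pos h2]
      rw [hrepr, pv_div_eq _ _ _ hmodlt, pv_mod_eq _ _ _ hmodlt, hsmod, hsdiv, hdd]
      push_cast [Nat.cast_sub (by omega : xr ≤ t % ch)]
      ring
    · have hge : xr * crn + br * crn ≤ s := by
        have hx : xr + br ≤ s / crn := by rw [hsdiv]; omega
        calc xr * crn + br * crn = crn * (xr + br) := by ring
        _ ≤ crn * (s / crn) := Nat.mul_le_mul_left _ hx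
        _ ≤ s := Nat.mul_div_le s crn
      have hc0 : ¬ (s < xr * crn + br * crn) := by omega
      have hrepr : s - (xr * crn + br * crn) = (s / crn - (xr + br)) * crn + s % crn := by
        have hx : xr + br ≤ s / crn := by rw [hsdiv]; omega
        have h3 : (s / crn - (xr + br)) * crn = s / crn * crn - (xr + br) * crn := Nat.sub_mul _ _ _
        have h4 : s / crn * crn = crn * (s / crn) := Nat.mul_comm _ _
        have h5 : (xr + br) * crn = xr * crn + br * crn := by ring
        have h7 : (xr + br) * crn ≤ s / crn * crn := Nat.mul_le_mul_right _ hx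
        omega
      rw [if_neg hc0, if_neg h1, if_neg h2]
      rw [hrepr, pv_div_eq _ _ _ hmodlt, pv_mod_eq _ _ _ hmodlt, hsmod, hsdiv, hdd]
      push_cast [Nat.cast_sub (by omega : xr + br ≤ t % ch)]
      have : t % ch - xr - br = t % ch - (xr + br) := by omega
      rw [this, Nat.cast_sub (by omega : xr + br ≤ t % ch)]
      push_cast
      ring

lemma pv_A_writes (cr : Int) (gn xr br : Nat)
    (hgn : Int.gcd ((gn * xr : Nat) : Int) ((gn * br : Nat) : Int) = gn) (hgpos : 0 < gn) :
    build_chunk_perm_inverse cr ((gn * xr : Nat) : Int) ((gn * br : Nat) : Int)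
      = ((List.range (gn * (xr + 2 * br) * cr.toNat)).map
            (fun (p : Nat) => ((pvPosA gn xr br cr.toNat p : Int), (p : Int)))).foldl pvStep
          (List.replicate (cr * (((gn * xr : Nat) : Int) + 2 * ((gn * br : Nat) : Int))).toNat 0) := by
  have hgc : ((Int.gcd ((gn * xr : Nat) : Int) ((gn * br : Nat) : Int) : Nat) : Int) = ((gn : Nat) : Int) := by
    exact_mod_cast hgn
  have hxr : PySem.Int.floordiv ((gn * xr : Nat) : Int) ((gn : Nat) : Int) = ((xr : Nat) : Int) := by
    rw [PySem.Int.floordiv_natCast, Nat.mul_div_cancel_left _ hgpos]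
  have hbr : PySem.Int.floordiv ((gn * br : Nat) : Int) ((gn : Nat) : Int) = ((br : Nat) : Int) := by
    rw [PySem.Int.floordiv_natCast, Nat.mul_div_cancel_left _ hgpos]
  have hsd : (((gn * xr : Nat) : Int) + 2 * ((gn * br : Nat) : Int)) = ((gn * (xr + 2 * br) : Nat) : Int) := by
    push_cast; ring
  unfold build_chunk_perm_inverse
  simp only [hgc, hxr, hbr, hsd]
  have hA : ((PySem.List.pyRange 0 ((gn : Nat) : Int) 1).foldl (fun st k =>
      let st := (PySem.List.pyRange 0 ((xr : Nat) : Int) 1).foldl (fun st j =>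
        let out_col := k * ((xr : Nat) : Int) + j
        (PySem.List.pyRange 0 cr 1).foldl
          (fun (st : List Int × Int) r =>
            (PySem.List.pySetD st.1 (r * ((gn * (xr + 2 * br) : Nat) : Int) + out_col) st.2, st.2 + 1)) st) st
      let st := (PySem.List.pyRange 0 ((br : Nat) : Int) 1).foldl (fun st j =>
        let out_col := ((gn * xr : Nat) : Int) + k * ((br : Nat) : Int) + j
        (PySem.List.pyRange 0 cr 1).foldl
          (fun (st : List Int × Int) r =>
            (PySem.List.pySetD st.1 (r * ((gn * (xr + 2 * br) : Nat) : Int) + out_col) st.2, st.2 + 1)) st) st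
      (PySem.List.pyRange 0 ((br : Nat) : Int) 1).foldl (fun st j =>
        let out_col := ((gn * xr : Nat) : Int) + ((gn * br : Nat) : Int) + k * ((br : Nat) : Int) + j
        (PySem.List.pyRange 0 cr 1).foldl
          (fun (st : List Int × Int) r =>
            (PySem.List.pySetD st.1 (r * ((gn * (xr + 2 * br) : Nat) : Int) + out_col) st.2, st.2 + 1)) st) st)
      (List.replicate (cr * ((gn * (xr + 2 * br) : Nat) : Int)).toNat 0, 0))
      = (((PySem.List.pyRange 0 ((gn : Nat) : Int) 1).flatMap (fun k =>
          (PySem.List.pyRange 0 ((xr : Nat) : Int) 1).map (fun j => k * ((xr : Nat) : Int) + j)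
          ++ (PySem.List.pyRange 0 ((br : Nat) : Int) 1).map (fun j => ((gn * xr : Nat) : Int) + k * ((br : Nat) : Int) + j)
          ++ (PySem.List.pyRange 0 ((br : Nat) : Int) 1).map (fun j => ((gn * xr : Nat) : Int) + ((gn * br : Nat) : Int) + k * ((br : Nat) : Int) + j))).foldl
          (pvScat ((gn * (xr + 2 * br) : Nat) : Int) cr)
          (List.replicate (cr * ((gn * (xr + 2 * br) : Nat) : Int)).toNat 0, 0)) := by
    rw [pv_foldl_flatMap]
    congr 1
    funext st k
    simp only [List.foldl_append, List.foldl_map]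
    rfl
  rw [hA, pv_main, pv_fwd_eq gn xr br cr]
  rw [← pv_enum_swap (fun p => ((pvPosA gn xr br cr.toNat p : Nat) : Int))
      (gn * (xr + 2 * br) * cr.toNat), List.foldl_map]
  rfl

lemma pv_main_case (cr : Int) (gn xr br : Nat)
    (hgn : Int.gcd ((gn * xr : Nat) : Int) ((gn * br : Nat) : Int) = gn) (hgpos : 0 < gn) :
    build_chunk_perm_inverse cr ((gn * xr : Nat) : Int) ((gn * br : Nat) : Int)
      = build_chunk_perm_inverse_alt cr ((gn * xr : Nat) : Int) ((gn * br : Nat) : Int) := by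
  rw [pv_A_writes cr gn xr br hgn hgpos, pv_B_writes cr gn xr br hgn hgpos]
  refine List.Perm.foldl_eq' (pv_ws_perm gn xr br cr.toNat) ?_ _
  intro a ha b hb z
  simp only [List.mem_map, List.mem_range] at ha hb
  obtain ⟨p, hp, rfl⟩ := ha
  obtain ⟨q, hq, rfl⟩ := hb
  by_cases hpq : p = q
  · subst hpq; rfl
  · refine pv_step_comm _ _ _ (by positivity) (by positivity) ?_
    simp only [ne_eq, Int.natCast_inj]
    intro hc
    exact hpq (by
      have h1 := (pvPosA_spec gn xr br cr.toNat hp).2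
      have h2 := (pvPosA_spec gn xr br cr.toNat hq).2
      rw [← h1, ← h2, hc])

-- ===== degenerate case: no writes on either side =====

lemma pv_foldl_const {α β : Type} (l : List β) (init : α) :
    l.foldl (fun s _ => s) init = init := by
  induction l generalizing init with
  | nil => rfl
  | cons a l ih => simp [List.foldl_cons, ih]

lemma pv_degenerate (cr x b : Int)
    (hn : cr * (x + 2 * b) ≤ 0)
    (h : cr ≤ 0 ∨ (PySem.Int.floordiv x ((Int.gcd x b : Nat) : Int) ≤ 0 ∧
      PySem.Int.floordiv b ((Int.gcd x b : Nat) : Int) ≤ 0)) :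
    build_chunk_perm_inverse cr x b = build_chunk_perm_inverse_alt cr x b := by
  unfold build_chunk_perm_inverse build_chunk_perm_inverse_alt
  have hB : PySem.List.pyRange 0 (cr * (x + 2 * b)) 1 = [] :=
    PySem.List.pyRange_one_eq_nil (by omega)
  rcases h with hcr | ⟨hx, hb⟩
  · have h1 : PySem.List.pyRange 0 cr 1 = [] := PySem.List.pyRange_one_eq_nil (by omega)
    simp only [h1, hB, List.foldl_nil, pv_foldl_const]
  · have h1 : PySem.List.pyRange 0 (PySem.Int.floordiv x ((Int.gcd x b : Nat) : Int)) 1 = [] :=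
      PySem.List.pyRange_one_eq_nil (by omega)
    have h2 : PySem.List.pyRange 0 (PySem.Int.floordiv b ((Int.gcd x b : Nat) : Int)) 1 = [] :=
      PySem.List.pyRange_one_eq_nil (by omega)
    simp only [h1, h2, hB, List.foldl_nil, pv_foldl_const]

-- ===== VERDICT (by name: the statement is the Claim_ definition above) =====
theorem build_chunk_perm_inverse_spec : Claim_equal_build_chunk_perm_inverse := by
  intro cr x b _ hpre
  unfold Spec_build_chunk_perm_inverse
  obtain ⟨hnz, hcase⟩ := hpre
  by_cases hxb : 0 ≤ x ∧ 0 ≤ b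
  · obtain ⟨hx, hb⟩ := hxb
    have hgpos : 0 < Int.gcd x b := Int.gcd_pos_iff.mpr (by tauto)
    have hdx : Int.gcd x b ∣ x.toNat := by
      have := Nat.gcd_dvd_left x.natAbs b.natAbs
      simpa [Int.gcd, show x.natAbs = x.toNat by omega] using this
    have hdb : Int.gcd x b ∣ b.toNat := by
      have := Nat.gcd_dvd_right x.natAbs b.natAbs
      simpa [Int.gcd, show b.natAbs = b.toNat by omega] using this
    have hx' : x = ((Int.gcd x b * (x.toNat / Int.gcd x b) : Nat) : Int) := by
      rw [Nat.mul_div_cancel' hdx]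
      omega
    have hb' : b = ((Int.gcd x b * (b.toNat / Int.gcd x b) : Nat) : Int) := by
      rw [Nat.mul_div_cancel' hdb]
      omega
    have hgn' : Int.gcd ((Int.gcd x b * (x.toNat / Int.gcd x b) : Nat) : Int)
        ((Int.gcd x b * (b.toNat / Int.gcd x b) : Nat) : Int) = Int.gcd x b := by
      rw [← hx', ← hb']
    calc build_chunk_perm_inverse cr x b
        = build_chunk_perm_inverse cr ((Int.gcd x b * (x.toNat / Int.gcd x b) : Nat) : Int)
            ((Int.gcd x b * (b.toNat / Int.gcd x b) : Nat) : Int) := by rw [← hx', ← hb']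
      _ = build_chunk_perm_inverse_alt cr ((Int.gcd x b * (x.toNat / Int.gcd x b) : Nat) : Int)
            ((Int.gcd x b * (b.toNat / Int.gcd x b) : Nat) : Int) :=
          pv_main_case cr (Int.gcd x b) _ _ hgn' hgpos
      _ = build_chunk_perm_inverse_alt cr x b := by rw [← hx', ← hb']
  · obtain ⟨hcase, hno⟩ := hcase
    have hgpos : (0 : Int) < ((Int.gcd x b : Nat) : Int) := by
      exact_mod_cast Int.gcd_pos_iff.mpr (by tauto)
    rcases hcase with h | h | h
    · refine pv_degenerate cr x b ?_ (Or.inl h)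
      rcases lt_or_eq_of_le h with hlt | heq
      · have hsd : 0 ≤ x + 2 * b := by
          by_contra hc
          exact hno ⟨hlt, by omega⟩
        exact mul_nonpos_iff.mpr (Or.inr ⟨le_of_lt hlt, hsd⟩)
      · rw [heq, zero_mul]
    · exact absurd h hxb
    · obtain ⟨hx, hb⟩ := h
      have hcr0 : 0 ≤ cr := by
        by_contra hc
        refine hno ⟨by omega, by omega⟩
      have hfx : PySem.Int.floordiv x ((Int.gcd x b : Nat) : Int) ≤ 0 := by
        rw [PySem.Int.floordiv_eq_ediv_of_pos hgpos]
        calc x / ((Int.gcd x b : Nat) : Int) ≤ 0 / ((Int.gcd x b : Nat) : Int) :=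
          Int.ediv_le_ediv hgpos hx
        _ = 0 := Int.zero_ediv _
      have hfb : PySem.Int.floordiv b ((Int.gcd x b : Nat) : Int) ≤ 0 := by
        rw [PySem.Int.floordiv_eq_ediv_of_pos hgpos]
        calc b / ((Int.gcd x b : Nat) : Int) ≤ 0 / ((Int.gcd x b : Nat) : Int) :=
          Int.ediv_le_ediv hgpos hb
        _ = 0 := Int.zero_ediv _
      refine pv_degenerate cr x b ?_ (Or.inr ⟨hfx, hfb⟩)
      exact mul_nonpos_iff.mpr (Or.inl ⟨hcr0, by omega⟩)
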